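-- pv_equiv track=rewrite | github.com/KevinAlexanderRochac/Spanish_wordle | wordle.py | no_letters
-- ===== SOURCE A (Python) =====
-- def no_letters(clues):
--     """This function receives the clues, and its output is a string
--     of capitalized letters in alphabetical order that are confirmed to not
--     appear in the targeted word"""
--     known = []
--     new_word = []
--     alpha = ''
--
--     for word, clues_list in clues:
--         for i in range(len(word)):
--             if clues_list[i] == 'grey':
--                 if word[i] in new_word:
--                     if word[i] in known:
--                         known.remove(word[i])
--                 else:
--                     known.append(word[i])
--             else:
--                 new_word.append(word[i])
--
--     gamma = sorted(set(known))  # removes duplicates and sorts them alphabetically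
--     for k in gamma:  # puts the items in the list and converts them into a string
--         alpha += k
--     return alpha
-- ===== SOURCE B (Python) =====
-- def no_letters(clues):
--     """Letters that were marked grey in some clue and never revealed as
--     present (non-grey) in any clue, sorted into one string."""
--     grey = set()
--     present = set()
--     for word, clues_list in clues:
--         for i, ch in enumerate(word):
--             if clues_list[i] == 'grey':
--                 grey.add(ch)
--             else:
--                 present.add(ch)
--     absent = sorted(grey - present)
--     return ''.join(absent)
-- ===== Notes on version B (the rewrite author's own statement) =====
-- stated objective: simpler
-- what changed: B replaces A's stateful known/new_word append-and-remove bookkeeping with two plain sets (grey letters, revealed letters) and returns the sorted set difference; Pre_ excludes clue lists shorter than their word, on which A raises IndexError.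
-- intended difference: On inputs where some letter has more grey occurrences before its first non-grey (revealed) occurrence than after it, A still lists that letter as absent even though a clue revealed it is in the word; B omits it, which is what the docstring ('confirmed to not appear in the targeted word') intends. — e.g. on no_letters([("aa", ["grey", "green"])]): A returns "a", B returns ""
import Mathlib
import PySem

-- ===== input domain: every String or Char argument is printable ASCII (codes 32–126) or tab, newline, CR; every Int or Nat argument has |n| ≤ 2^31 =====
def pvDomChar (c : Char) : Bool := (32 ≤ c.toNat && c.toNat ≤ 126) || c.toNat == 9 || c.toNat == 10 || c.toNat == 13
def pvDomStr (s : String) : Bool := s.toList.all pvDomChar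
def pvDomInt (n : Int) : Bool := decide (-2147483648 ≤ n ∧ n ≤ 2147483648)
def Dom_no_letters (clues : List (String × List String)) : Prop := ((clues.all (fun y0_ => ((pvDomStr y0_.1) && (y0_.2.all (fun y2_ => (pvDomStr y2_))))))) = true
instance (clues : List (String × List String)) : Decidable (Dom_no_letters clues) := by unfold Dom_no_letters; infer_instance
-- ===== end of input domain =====

-- B replaces A's stateful known/new_word append-and-remove bookkeeping with two sets (grey, revealed) and a sorted set difference; where a grey letter was also revealed A may still list it (D_ below) and B intentionally omits it.


-- ===== PORT A =====
-- Literal transliteration of A: nested loops over (word, clues_list) and i in range(len(word)),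
-- state (known, new_word); word[i] / clues_list[i] via pyGetD (Pre_ keeps the clue index in
-- range; the word index is always in range); known.remove guarded by the membership test is
-- List.erase.  Final sorted(set(known)) and the alpha += k string loop.
def no_letters (clues : List (String × List String)) : String :=
  let st := clues.foldl
    (fun (st : List Char × List Char) wc =>
      (List.range wc.1.toList.length).foldl
        (fun (st : List Char × List Char) (i : Nat) =>
          let c := PySem.List.pyGetD wc.1.toList (i : Int) ' '
          if PySem.List.pyGetD wc.2 (i : Int) "" == "grey" then
            if st.2.contains c then
              if st.1.contains c then (st.1.erase c, st.2) else st
            else (st.1 ++ [c], st.2)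
          else (st.1, st.2 ++ [c])) st)
    (([] : List Char), ([] : List Char))
  let gamma := PySem.List.sorted (PySem.Set.ofList st.1) (fun x => x) false
  String.ofList (gamma.foldl (fun (alpha : List Char) k => alpha ++ [k]) [])

-- ===== PORT B =====
-- Literal transliteration of B (Source B): one pass over enumerate(word) (clues_list[i] via pyGetD;
-- Pre_ keeps the index in range) filling two sets (grey, revealed), then ''.join(sorted(grey - present)).
-- sorted of a set with the identity key is order-safe (injective key).
def no_letters_alt (clues : List (String × List String)) : String :=
  let st := clues.foldl
    (fun (st : PySem.Set Char × PySem.Set Char) wc =>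
      (PySem.List.enumerate wc.1.toList).foldl
        (fun (st : PySem.Set Char × PySem.Set Char) p =>
          if PySem.List.pyGetD wc.2 p.1 "" == "grey" then (PySem.Set.add st.1 p.2, st.2)
          else (st.1, PySem.Set.add st.2 p.2)) st)
    ((PySem.Set.empty : PySem.Set Char), (PySem.Set.empty : PySem.Set Char))
  let absent := PySem.List.sorted (PySem.Set.diff st.1 st.2) (fun x => x) false
  String.ofList absent

-- ===== PRECONDITION & SPEC =====
-- Pre_: every clue list is at least as long as its word — on shorter clue lists Python A
-- raises IndexError at clues_list[i].
def Pre_no_letters (clues : List (String × List String)) : Prop :=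
  ∀ p ∈ clues, p.1.toList.length ≤ p.2.length
instance (clues : List (String × List String)) : Decidable (Pre_no_letters clues) := by
  unfold Pre_no_letters; infer_instance

def pvWitness_no_letters : (List (String × List String)) :=
  [("ab", ["grey", "green"]), ("ba", ["grey", "grey"])]

-- Some letter is revealed (a non-grey clue) yet has strictly more grey occurrences before its
-- first reveal than after (s below is the letter's grey-flag sequence across all clues, in clue
-- order): there A lists the letter as absent although a clue proved it present; B omits it,
-- which is what the docstring ("confirmed to not appear in the word") intends.
def D_no_letters (clues : List (String × List String)) : Prop :=
  ∃ wc ∈ clues, ∃ c ∈ wc.1.toList,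
    let s := clues.flatMap fun w => (w.1.toList.zip w.2).filterMap fun p =>
      if p.1 = c then some (p.2 == "grey") else none
    false ∈ s ∧ s.count true < 2 * s.idxOf false
instance (clues : List (String × List String)) : Decidable (D_no_letters clues) := by
  unfold D_no_letters; infer_instance

def Spec_no_letters (clues : List (String × List String)) (out : String) : Prop :=
  ¬ D_no_letters clues → out = no_letters_alt clues
instance (clues : List (String × List String)) (out : String) : Decidable (Spec_no_letters clues out) := by unfold Spec_no_letters; infer_instance

def pvDiffWitness_no_letters : (List (String × List String)) :=
  [("aa", ["grey", "green"])]
def pvDiffWitnessOut_no_letters : String × String := ("a", "")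

-- ===== CLAIM (what is proved, stated in full; the proofs are below) =====
def Claim_unchanged_no_letters : Prop := ∀ (clues : List (String × List String)), Dom_no_letters clues → Pre_no_letters clues → Spec_no_letters clues (no_letters clues)
def Claim_changed_no_letters : Prop := Dom_no_letters (pvDiffWitness_no_letters) ∧ Pre_no_letters (pvDiffWitness_no_letters) ∧ D_no_letters (pvDiffWitness_no_letters) ∧ no_letters (pvDiffWitness_no_letters) = pvDiffWitnessOut_no_letters.1 ∧ no_letters_alt (pvDiffWitness_no_letters) = pvDiffWitnessOut_no_letters.2 ∧ pvDiffWitnessOut_no_letters.1 ≠ pvDiffWitnessOut_no_letters.2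
def Claim_exact_no_letters : Prop := ∀ (clues : List (String × List String)), Dom_no_letters clues → Pre_no_letters clues → D_no_letters clues → no_letters clues ≠ no_letters_alt clues

-- ===== LEMMAS AND PROOFS =====

-- flattened occurrence list and a letter's flag sequence (proof-side views)
def pvDOcc (clues : List (String × List String)) : List (Char × Bool) :=
  clues.flatMap (fun wc => (wc.1.toList.zip wc.2).map (fun p => (p.1, p.2 == "grey")))

def pvDSeq (occ : List (Char × Bool)) (c : Char) : List Bool :=
  (occ.filter (fun e => e.1 == c)).map (·.2)

-- the letter's grey-flag sequence, as D_ builds it (proof-side name for D_'s let)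
def pvSeq (clues : List (String × List String)) (c : Char) : List Bool :=
  clues.flatMap fun w => (w.1.toList.zip w.2).filterMap fun p =>
    if p.1 = c then some (p.2 == "grey") else none

-- proof-side view of D_'s per-letter test, via the first reveal's index
def pvDCond (seq : List Bool) : Bool :=
  match PySem.List.index? seq false with
  | some k => decide ((seq.drop (k + 1)).count true < (seq.take k).count true)
  | none => false

-- A's loop body as a step over one occurrence (letter, is_grey)
def pvStepA (st : List Char × List Char) (e : Char × Bool) : List Char × List Char :=
  if e.2 then
    if st.2.contains e.1 then
      if st.1.contains e.1 then (st.1.erase e.1, st.2) else st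
    else (st.1 ++ [e.1], st.2)
  else (st.1, st.2 ++ [e.1])

-- B's loop body as a step over one occurrence
def pvStepB (st : PySem.Set Char × PySem.Set Char) (e : Char × Bool) : PySem.Set Char × PySem.Set Char :=
  if e.2 then (PySem.Set.add st.1 e.1, st.2) else (st.1, PySem.Set.add st.2 e.1)

-- per-letter abstract state for A (count of the letter in known, letter revealed in new_word)
def pvStepC (q : Nat × Bool) (g : Bool) : Nat × Bool :=
  if g then (if q.2 then q.1 - 1 else q.1 + 1, q.2) else (q.1, true)

-- A keeps the letter iff this holds of its occurrence sequence
def pvAKeep (seq : List Bool) : Bool :=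
  match PySem.List.index? seq false with
  | some k => decide ((seq.drop (k + 1)).count true < (seq.take k).count true)
  | none => !seq.isEmpty

theorem pv_inner_eq (w : List Char) (cl : List String) (hcl : w.length ≤ cl.length) :
    ∀ (n : Nat), n ≤ w.length → ∀ (st : List Char × List Char),
    (List.range n).foldl
      (fun (st : List Char × List Char) (i : Nat) =>
        let c := PySem.List.pyGetD w (i : Int) ' '
        if PySem.List.pyGetD cl (i : Int) "" == "grey" then
          if st.2.contains c then
            if st.1.contains c then (st.1.erase c, st.2) else st
          else (st.1 ++ [c], st.2)
        else (st.1, st.2 ++ [c])) st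
    = (((w.zip cl).take n).map (fun p => (p.1, p.2 == "grey"))).foldl pvStepA st := by
  intro n
  induction n with
  | zero => intro _ st; simp
  | succ n ih =>
    intro h st
    have hn : n < w.length := by omega
    have hncl : n < cl.length := by omega
    rw [List.range_succ, List.foldl_append, ih (by omega)]
    have hzip : (w.zip cl).take (n + 1)
        = (w.zip cl).take n ++ [(w[n], cl[n])] := by
      rw [List.take_add_one]
      have : (w.zip cl)[n]? = some (w[n], cl[n]) := by
        rw [List.getElem?_zip_eq_some]
        exact ⟨List.getElem?_eq_getElem hn, List.getElem?_eq_getElem hncl⟩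
      simp [this]
    rw [hzip, List.map_append, List.foldl_append]
    simp only [List.foldl_cons, List.foldl_nil, List.map_cons, List.map_nil]
    simp [pvStepA, PySem.List.pyGetD_natCast, List.getD_eq_getElem?_getD,
      List.getElem?_eq_getElem hn, List.getElem?_eq_getElem hncl]

-- A's nested fold is the fold of pvStepA over the flattened occurrence list
theorem pv_flatA (clues : List (String × List String)) :
    ∀ (st : List Char × List Char),
    (pvDOcc clues).foldl pvStepA st
    = clues.foldl (fun st wc => ((wc.1.toList.zip wc.2).map (fun p => (p.1, p.2 == "grey"))).foldl pvStepA st) st := by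
  unfold pvDOcc
  induction clues with
  | nil => intro st; simp
  | cons wc rest ih =>
    intro st
    simp only [List.flatMap_cons, List.foldl_append, List.foldl_cons, ih]

-- A's nested fold is the fold of pvStepA over the flattened occurrence list
theorem pv_A_state (clues : List (String × List String)) (hpre : Pre_no_letters clues) :
    clues.foldl
      (fun (st : List Char × List Char) wc =>
        (List.range wc.1.toList.length).foldl
          (fun (st : List Char × List Char) (i : Nat) =>
            let c := PySem.List.pyGetD wc.1.toList (i : Int) ' '
            if PySem.List.pyGetD wc.2 (i : Int) "" == "grey" then
              if st.2.contains c then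
                if st.1.contains c then (st.1.erase c, st.2) else st
              else (st.1 ++ [c], st.2)
            else (st.1, st.2 ++ [c])) st)
      (([] : List Char), ([] : List Char))
    = (pvDOcc clues).foldl pvStepA (([] : List Char), ([] : List Char)) := by
  rw [pv_flatA]
  apply PySem.List.foldl_congr_mem'
  intro wc hwc st
  rw [pv_inner_eq wc.1.toList wc.2 (hpre wc hwc) wc.1.toList.length (le_refl _) st,
    List.take_of_length_le (by simp)]

-- the enumerate/pyGetD pairing equals the zip pairing while the clue index stays in range
theorem pv_innerB (w : List Char) (cl : List String) (hcl : w.length ≤ cl.length) :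
    (PySem.List.enumerate w).map (fun p => (p.2, PySem.List.pyGetD cl p.1 "" == "grey"))
      = (w.zip cl).map (fun p => (p.1, p.2 == "grey")) := by
  apply List.ext_getElem
  · simp [PySem.List.length_enumerate]
    omega
  · intro i h1 h2
    have hiw : i < w.length := by simpa [PySem.List.length_enumerate] using h1
    have hic : i < cl.length := by omega
    simp [PySem.List.getElem_enumerate, List.getElem_zip, PySem.List.pyGetD_natCast,
      List.getD_eq_getElem?_getD, List.getElem?_eq_getElem hic]

theorem pv_flatB (clues : List (String × List String)) :
    ∀ (st : PySem.Set Char × PySem.Set Char),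
    (pvDOcc clues).foldl pvStepB st
    = clues.foldl (fun st wc => ((wc.1.toList.zip wc.2).map (fun p => (p.1, p.2 == "grey"))).foldl pvStepB st) st := by
  unfold pvDOcc
  induction clues with
  | nil => intro st; simp
  | cons wc rest ih =>
    intro st
    simp only [List.flatMap_cons, List.foldl_append, List.foldl_cons, ih]

-- B's nested fold is the fold of pvStepB over the flattened occurrence list
theorem pv_B_state (clues : List (String × List String)) (hpre : Pre_no_letters clues) :
    clues.foldl
      (fun (st : PySem.Set Char × PySem.Set Char) wc =>
        (PySem.List.enumerate wc.1.toList).foldl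
          (fun (st : PySem.Set Char × PySem.Set Char) p =>
            if PySem.List.pyGetD wc.2 p.1 "" == "grey" then (PySem.Set.add st.1 p.2, st.2)
            else (st.1, PySem.Set.add st.2 p.2)) st)
      ((PySem.Set.empty : PySem.Set Char), (PySem.Set.empty : PySem.Set Char))
    = (pvDOcc clues).foldl pvStepB ((PySem.Set.empty : PySem.Set Char), (PySem.Set.empty : PySem.Set Char)) := by
  rw [pv_flatB]
  apply PySem.List.foldl_congr_mem'
  intro wc hwc st
  rw [← pv_innerB wc.1.toList wc.2 (hpre wc hwc), List.foldl_map]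
  rfl

-- projecting the full A-state to one letter commutes with one step of A
theorem pv_proj_step (c : Char) (st : List Char × List Char) (e : Char × Bool) :
    (((pvStepA st e).1.count c : Nat), (pvStepA st e).2.contains c)
    = if e.1 == c then pvStepC (st.1.count c, st.2.contains c) e.2
      else (st.1.count c, st.2.contains c) := by
  obtain ⟨known, nw⟩ := st
  obtain ⟨d, g⟩ := e
  simp only [pvStepA, pvStepC]
  by_cases hdc : d = c
  · subst hdc
    cases g
    · simp
    · by_cases hrev : d ∈ nw
      · by_cases hk : d ∈ known
        · simp [hrev, hk, List.count_erase_self]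
        · simp [hrev, hk, List.count_eq_zero.mpr hk]
      · simp [hrev]
  · have hbeq : (d == c) = false := by simp [hdc]
    cases g
    · simp [hbeq, Ne.symm hdc]
    · by_cases hrev : d ∈ nw
      · by_cases hk : d ∈ known
        · simp [hrev, hk, hbeq, List.count_erase_of_ne (Ne.symm hdc)]
        · simp [hrev, hk, hbeq]
      · simp [hrev, hbeq, List.count_eq_zero.mpr (show c ∉ [d] by simp [Ne.symm hdc])]

theorem pv_proj_fold (c : Char) (occ : List (Char × Bool)) :
    ∀ st : List Char × List Char,
    (((occ.foldl pvStepA st).1.count c : Nat), (occ.foldl pvStepA st).2.contains c)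
    = (pvDSeq occ c).foldl pvStepC (st.1.count c, st.2.contains c) := by
  induction occ with
  | nil => intro st; rfl
  | cons e occ ih =>
    intro st
    simp only [List.foldl_cons, pvDSeq, List.filter_cons]
    by_cases h : e.1 == c
    · simp only [h, if_pos, List.map_cons, List.foldl_cons]
      have := ih (pvStepA st e)
      simp only [pvDSeq] at this
      rw [this, pv_proj_step, if_pos h]
    · have := ih (pvStepA st e)
      simp only [pvDSeq] at this
      rw [this, pv_proj_step, if_neg (by simp_all)]
      simp [h]

-- while the letter is unrevealed every grey occurrence increments (all-true prefix)
theorem pv_m1 (seq : List Bool) (h : false ∉ seq) :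
    ∀ n : Nat, seq.foldl pvStepC (n, false) = (n + seq.length, false) := by
  induction seq with
  | nil => intro n; simp
  | cons b seq ih =>
    intro n
    have hb : b = true := by cases b <;> simp_all
    subst hb
    have hstep : pvStepC (n, false) true = (n + 1, false) := by simp [pvStepC]
    rw [List.foldl_cons, hstep, ih (by simp_all) (n + 1)]
    simp
    omega

-- once revealed, the grey occurrences subtract (floored at zero = Nat subtraction)
theorem pv_m2 (seq : List Bool) :
    ∀ n : Nat, seq.foldl pvStepC (n, true) = (n - seq.count true, true) := by
  induction seq with
  | nil => intro n; simp
  | cons b seq ih =>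
    intro n
    cases b
    · have hstep : pvStepC (n, true) false = (n, true) := by simp [pvStepC]
      rw [List.foldl_cons, hstep, ih n]
      simp
    · have hstep : pvStepC (n, true) true = (n - 1, true) := by simp [pvStepC]
      rw [List.foldl_cons, hstep, ih (n - 1)]
      simp only [List.count_cons]
      congr 1
      simp
      omega

-- the per-letter machine: final count positive iff pvAKeep
theorem pv_machine (seq : List Bool) :
    0 < (seq.foldl pvStepC (0, false)).1 ↔ pvAKeep seq = true := by
  unfold pvAKeep
  cases h : PySem.List.index? seq false with
  | none =>
    have hnm : false ∉ seq := (PySem.List.index?_eq_none_iff seq false).mp h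
    rw [pv_m1 seq hnm 0]
    cases seq <;> simp
  | some k =>
    obtain ⟨pre, suf, hseq, hlen, hpre⟩ := (PySem.List.index?_eq_some_iff seq false k).mp h
    subst hseq
    rw [List.foldl_append, pv_m1 pre hpre 0, List.foldl_cons]
    have hstep : pvStepC (0 + pre.length, false) false = (pre.length, true) := by
      simp [pvStepC]
    rw [hstep, pv_m2 suf pre.length]
    have htake : (pre ++ false :: suf).take k = pre := by
      rw [← hlen]; exact List.take_left
    have hdrop : (pre ++ false :: suf).drop (k + 1) = suf := by
      rw [← hlen]
      rw [show pre ++ false :: suf = (pre ++ [false]) ++ suf by simp]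
      rw [List.drop_left' (by simp)]
    have hcnt : pre.count true = pre.length := by
      rw [List.count_eq_length]
      intro b hb
      cases b
      · exact absurd hb hpre
      · rfl
    simp only [htake, hdrop, hcnt, decide_eq_true_eq]
    omega

-- A's membership characterisation
theorem pv_A_mem (occ : List (Char × Bool)) (c : Char) :
    c ∈ (occ.foldl pvStepA ([], [])).1 ↔ pvAKeep (pvDSeq occ c) = true := by
  rw [← List.count_pos_iff, ← pv_machine]
  have h := congrArg Prod.fst (pv_proj_fold c occ ([], []))
  simp only at h
  rw [h]
  rfl

-- B's membership characterisation
theorem pv_B_mem (occ : List (Char × Bool)) (c : Char) :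
    ∀ st : PySem.Set Char × PySem.Set Char,
    (c ∈ (occ.foldl pvStepB st).1 ↔ c ∈ st.1 ∨ (c, true) ∈ occ)
    ∧ (c ∈ (occ.foldl pvStepB st).2 ↔ c ∈ st.2 ∨ (c, false) ∈ occ) := by
  induction occ with
  | nil => intro st; simp
  | cons e occ ih =>
    intro st
    obtain ⟨d, g⟩ := e
    rw [List.foldl_cons]
    obtain ⟨ih1, ih2⟩ := ih (pvStepB st (d, g))
    rw [ih1, ih2]
    cases g <;> constructor <;>
      simp [pvStepB, PySem.Set.mem_add, Prod.ext_iff] <;> tauto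

-- B's sets stay duplicate-free
theorem pv_B_nodup (occ : List (Char × Bool)) :
    ∀ st : PySem.Set Char × PySem.Set Char, st.1.Nodup → st.2.Nodup →
    ((occ.foldl pvStepB st).1.Nodup ∧ (occ.foldl pvStepB st).2.Nodup) := by
  induction occ with
  | nil => intro st h1 h2; exact ⟨h1, h2⟩
  | cons e occ ih =>
    intro st h1 h2
    rw [List.foldl_cons]
    unfold pvStepB
    by_cases hg : e.2 = true
    · simp only [hg, ite_true]
      exact ih _ (PySem.Set.nodup_add _ _ h1) h2
    · simp only [Bool.not_eq_true] at hg
      simp only [hg, Bool.false_eq_true, ite_false]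
      exact ih _ h1 (PySem.Set.nodup_add _ _ h2)

-- occurrence-pair membership ↔ flag in the letter's sequence
theorem pv_seq_mem (occ : List (Char × Bool)) (c : Char) (g : Bool) :
    g ∈ pvDSeq occ c ↔ (c, g) ∈ occ := by
  simp only [pvDSeq, List.mem_map, List.mem_filter, beq_iff_eq]
  constructor
  · rintro ⟨⟨d, g'⟩, ⟨hm, hd⟩, hg⟩
    simp only at hd hg
    subst hd; subst hg; exact hm
  · intro hm
    exact ⟨(c, g), ⟨hm, rfl⟩, rfl⟩

theorem pv_seq_ne_nil (occ : List (Char × Bool)) (c : Char) :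
    pvDSeq occ c ≠ [] ↔ c ∈ occ.map Prod.fst := by
  constructor
  · intro h
    obtain ⟨g, hg⟩ := List.exists_mem_of_ne_nil _ h
    exact List.mem_map.mpr ⟨(c, g), (pv_seq_mem occ c g).mp hg, rfl⟩
  · intro h hnil
    obtain ⟨e, he, hc⟩ := List.mem_map.mp h
    have : e.2 ∈ pvDSeq occ c := (pv_seq_mem occ c e.2).mpr (by rw [← hc]; simpa using he)
    rw [hnil] at this
    simp at this

-- if pvDCond holds, the sequence contains a reveal
theorem pv_dcond_false_mem (seq : List Bool) (h : pvDCond seq = true) : false ∈ seq := by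
  unfold pvDCond at h
  cases hidx : PySem.List.index? seq false with
  | none => rw [hidx] at h; simp at h
  | some k => exact (PySem.List.index?_isSome_iff seq false).mp (by rw [hidx]; rfl)

-- pvAKeep vs pvDCond and the revealed flag
theorem pv_keep_iff (seq : List Bool) :
    pvAKeep seq = true ↔ (pvDCond seq = true ∨ (false ∉ seq ∧ seq ≠ [])) := by
  unfold pvAKeep pvDCond
  cases hidx : PySem.List.index? seq false with
  | none =>
    have hnm : false ∉ seq := (PySem.List.index?_eq_none_iff seq false).mp hidx
    cases seq <;> simp_all
  | some k =>
    have hm : false ∈ seq := (PySem.List.index?_isSome_iff seq false).mp (by rw [hidx]; rfl)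
    simp [hm]

-- D_'s takeWhile/dropWhile form agrees with the index? form
theorem pv_dcond_tw (seq : List Bool) (h : false ∈ seq) :
    pvDCond seq = decide (seq.count true < 2 * seq.idxOf false) := by
  have hpre : false ∉ seq.takeWhile id := by
    intro hm
    have := List.mem_takeWhile_imp hm
    simp at this
  have hne : seq.dropWhile id ≠ [] := by
    intro hnil
    apply hpre
    have hs := List.takeWhile_append_dropWhile (p := id) (l := seq)
    rw [hnil, List.append_nil] at hs
    rwa [hs]
  have hcons : seq.dropWhile id = false :: (seq.dropWhile id).tail := by
    obtain ⟨b, tl2, hbt⟩ := List.exists_cons_of_ne_nil hne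
    have hhd := List.head_dropWhile_not (p := id) hne
    simp only [hbt, List.head_cons, id] at hhd
    rw [hbt, hhd]
    rfl
  have hseq : seq = seq.takeWhile id ++ false :: (seq.dropWhile id).tail := by
    conv_lhs => rw [← List.takeWhile_append_dropWhile (p := id) (l := seq)]
    rw [← hcons]
  set pre := seq.takeWhile id with hpredef
  set tl := (seq.dropWhile id).tail with htldef
  have hidx : PySem.List.index? seq false = some pre.length := by
    rw [PySem.List.index?_eq_some_iff]
    exact ⟨pre, tl, hseq, rfl, hpre⟩
  have htake : seq.take pre.length = pre := by
    conv_lhs => rw [hseq]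
    exact List.take_left
  have hdrop : seq.drop (pre.length + 1) = tl := by
    conv_lhs => rw [hseq, show pre ++ false :: tl = (pre ++ [false]) ++ tl by simp]
    rw [List.drop_left' (by simp)]
  have hcnt : pre.count true = pre.length := by
    rw [List.count_eq_length]
    intro b hb
    have := List.mem_takeWhile_imp (hpredef ▸ hb)
    simpa using this
  unfold pvDCond
  rw [hidx]
  simp only [htake, hdrop, hcnt]
  rw [decide_eq_decide]
  have hio : seq.idxOf false = pre.length := by
    conv_lhs => rw [hseq]
    rw [List.idxOf_append]
    simp [hpre]
  rw [hio]
  conv_rhs => rw [hseq]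
  simp [List.count_append, hcnt]
  omega

-- pvSeq is pvDSeq of the flattened occurrences
theorem pv_fm (l : List (Char × String)) (c : Char) :
    (l.filterMap fun p => if p.1 = c then some (p.2 == "grey") else none)
    = ((l.map (fun p => (p.1, p.2 == "grey"))).filter (fun e => e.1 == c)).map (·.2) := by
  induction l with
  | nil => rfl
  | cons p l ih => by_cases h : p.1 = c <;> simp [h, ih]

theorem pv_seq_eq (clues : List (String × List String)) (c : Char) :
    pvSeq clues c = pvDSeq (pvDOcc clues) c := by
  unfold pvSeq pvDSeq pvDOcc
  induction clues with
  | nil => rfl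
  | cons wc rest ih =>
    simp only [List.flatMap_cons, List.filter_append, List.map_append, ← ih]
    congr 1
    exact pv_fm _ c

-- D_ in terms of pvDCond
theorem pv_D_iff (clues : List (String × List String)) :
    D_no_letters clues
      ↔ ∃ c ∈ (pvDOcc clues).map Prod.fst, pvDCond (pvDSeq (pvDOcc clues) c) = true := by
  unfold D_no_letters
  constructor
  · rintro ⟨wc, hwc, c, hc, hf0, hlt0⟩
    have hf : false ∈ pvSeq clues c := hf0
    have hlt : (pvSeq clues c).count true < 2 * (pvSeq clues c).idxOf false := hlt0
    rw [pv_seq_eq] at hf hlt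
    refine ⟨c, (pv_seq_ne_nil _ _).mp (List.ne_nil_of_mem hf), ?_⟩
    rw [pv_dcond_tw _ hf, ← pv_seq_eq]
    rw [← pv_seq_eq] at hlt
    simpa [pv_seq_eq] using hlt
  · rintro ⟨c, hcm, hcond⟩
    have hfm : false ∈ pvDSeq (pvDOcc clues) c := pv_dcond_false_mem _ hcond
    have hocc : (c, false) ∈ pvDOcc clues := (pv_seq_mem _ _ _).mp hfm
    unfold pvDOcc at hocc
    rw [List.mem_flatMap] at hocc
    obtain ⟨wc, hwc, hmem⟩ := hocc
    obtain ⟨p, hp, hpe⟩ := List.mem_map.mp hmem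
    have hc : p.1 = c := congrArg Prod.fst hpe
    refine ⟨wc, hwc, c, hc ▸ (List.of_mem_zip hp).1, ?_⟩
    rw [pv_dcond_tw _ hfm] at hcond
    have hb1 : false ∈ pvSeq clues c := by rwa [pv_seq_eq]
    have hb2 : (pvSeq clues c).count true < 2 * (pvSeq clues c).idxOf false := by
      rw [pv_seq_eq]
      simpa using hcond
    exact ⟨hb1, hb2⟩

-- under ¬ D_ the two keep-conditions agree letter by letter
theorem pv_keep_eq (occ : List (Char × Bool))
    (hnd : ∀ c ∈ occ.map Prod.fst, pvDCond (pvDSeq occ c) = false) (a : Char) :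
    pvAKeep (pvDSeq occ a) = true ↔ (true ∈ pvDSeq occ a ∧ false ∉ pvDSeq occ a) := by
  rw [pv_keep_iff]
  constructor
  · rintro (hc | ⟨hf, hne⟩)
    · exfalso
      have hfm := pv_dcond_false_mem _ hc
      have hmem : a ∈ occ.map Prod.fst :=
        (pv_seq_ne_nil occ a).mp (List.ne_nil_of_mem hfm)
      rw [hnd a hmem] at hc
      exact Bool.false_ne_true hc
    · refine ⟨?_, hf⟩
      obtain ⟨g, hg⟩ := List.exists_mem_of_ne_nil _ hne
      cases g
      · exact absurd hg hf
      · exact hg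
  · rintro ⟨ht, hf⟩
    exact Or.inr ⟨hf, List.ne_nil_of_mem ht⟩

-- the two sorted letter lists, as produced by the ports, are equal under ¬ D_
theorem pv_lists_eq (clues : List (String × List String))
    (hnd : ¬ D_no_letters clues) :
    PySem.List.sorted (PySem.Set.ofList ((pvDOcc clues).foldl pvStepA ([], [])).1) (fun x => x) false
    = PySem.List.sorted
        (PySem.Set.diff ((pvDOcc clues).foldl pvStepB (PySem.Set.empty, PySem.Set.empty)).1
          ((pvDOcc clues).foldl pvStepB (PySem.Set.empty, PySem.Set.empty)).2) (fun x => x) false := by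
  have hnd' : ∀ c ∈ (pvDOcc clues).map Prod.fst, pvDCond (pvDSeq (pvDOcc clues) c) = false := by
    intro c hc
    cases hcase : pvDCond (pvDSeq (pvDOcc clues) c) with
    | false => rfl
    | true => exact absurd ((pv_D_iff clues).mpr ⟨c, hc, hcase⟩) hnd
  have hbn := pv_B_nodup (pvDOcc clues) (PySem.Set.empty, PySem.Set.empty)
    List.nodup_nil List.nodup_nil
  apply PySem.List.sorted_eq_sorted_of_perm _ _ _ Function.injective_id
  apply (List.perm_ext_iff_of_nodup (PySem.Set.nodup_ofList _)
    (PySem.Set.nodup_diff _ _ hbn.1)).mpr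
  intro a
  rw [PySem.Set.mem_ofList, pv_A_mem, PySem.Set.mem_diff]
  have hb := pv_B_mem (pvDOcc clues) a (PySem.Set.empty, PySem.Set.empty)
  rw [hb.1, hb.2]
  rw [pv_keep_eq (pvDOcc clues) hnd' a]
  simp only [PySem.Set.empty, List.not_mem_nil, false_or]
  rw [pv_seq_mem, pv_seq_mem]

-- ===== VERDICT (by name: the statement is the Claim_ definition above) =====
theorem no_letters_spec : Claim_unchanged_no_letters := by
  intro clues _ hpre hnd
  unfold no_letters no_letters_alt
  simp only [pv_A_state clues hpre, pv_B_state clues hpre]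
  rw [PySem.List.foldl_append_singleton, List.nil_append]
  exact congrArg String.ofList (pv_lists_eq clues hnd)

theorem no_letters_changed : Claim_changed_no_letters := by
  unfold Claim_changed_no_letters
  refine ⟨by decide, by decide, ?_, by decide, by decide, by decide⟩
  unfold D_no_letters pvDiffWitness_no_letters
  exact ⟨("aa", ["grey", "green"]), by decide, 'a', by decide, by decide, by decide⟩

theorem no_letters_tight : Claim_exact_no_letters := by
  intro clues _ hpre hd heq
  obtain ⟨c, hcm, hcond⟩ := (pv_D_iff clues).mp hd
  unfold no_letters no_letters_alt at heq
  simp only [pv_A_state clues hpre, pv_B_state clues hpre] at heq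
  rw [PySem.List.foldl_append_singleton, List.nil_append] at heq
  have hle := String.ofList_inj.mp heq
  have hmem : c ∈ PySem.Set.ofList ((pvDOcc clues).foldl pvStepA ([], [])).1 := by
    rw [PySem.Set.mem_ofList, pv_A_mem, pv_keep_iff]
    exact Or.inl hcond
  have hmem' : c ∈ PySem.Set.diff ((pvDOcc clues).foldl pvStepB (PySem.Set.empty, PySem.Set.empty)).1
      ((pvDOcc clues).foldl pvStepB (PySem.Set.empty, PySem.Set.empty)).2 := by
    exact (PySem.List.mem_sorted _ _ _ _).mp
      (hle ▸ (PySem.List.mem_sorted _ _ _ _).mpr hmem)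
  rw [PySem.Set.mem_diff] at hmem'
  apply hmem'.2
  rw [(pv_B_mem (pvDOcc clues) c (PySem.Set.empty, PySem.Set.empty)).2]
  exact Or.inr ((pv_seq_mem (pvDOcc clues) c false).mp (pv_dcond_false_mem _ hcond))
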